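-- pv_equiv track=rewrite | github.com/Roverlucas/genai-reproducibility-protocol | analysis/compute_json_metrics.py | extract_condition_from_run_id
-- ===== SOURCE A (Python) =====
-- def extract_condition_from_run_id(run_id: str) -> str:
--     """
--     Extract condition label from run_id.
--     Examples:
--     - llama3_8b_extraction_abs_001_C1_fixed_seed_rep0 -> C1_fixed_seed
--     - gpt4_extraction_abs_001_C2_var_seed_rep0 -> C2_var_seed
--     - llama3_8b_extraction_abs_001_C3_temp0.0_rep0 -> C3_temp0.0
--     """
--     parts = run_id.split("_")
--
--     # Find the C1/C2/C3 part
--     for i, part in enumerate(parts):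
--         if part.startswith("C1") or part.startswith("C2") or part.startswith("C3"):
--             # Collect condition parts (e.g., C1, fixed, seed or C3, temp0.0)
--             condition_parts = [part]
--
--             # Add following parts until we hit "rep"
--             for j in range(i + 1, len(parts)):
--                 if parts[j].startswith("rep"):
--                     break
--                 condition_parts.append(parts[j])
--
--             return "_".join(condition_parts)
--
--     return "unknown"
-- ===== SOURCE B (Python) =====
-- def extract_condition_from_run_id(run_id: str) -> str:
--     # Scan token starts directly on the string: hop from one underscore-delimited
--     # token start to the next; when the current suffix starts with "C1"/"C2"/"C3",
--     # cut it at the first "_rep" occurrence (the boundary of the first rep-token).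
--     s = run_id
--     while True:
--         if s[:1] == "C" and s[1:2] in ("1", "2", "3"):
--             stop = s.find("_rep")
--             return s if stop == -1 else s[:stop]
--         cut = s.find("_")
--         if cut == -1:
--             return "unknown"
--         s = s[cut + 1:]
-- ===== Notes on version B (the rewrite author's own statement) =====
-- stated objective: simpler
-- what changed: A splits the run_id into a token list and scans it with an enumerate loop plus an inner index loop that collects tokens up to the first rep-prefixed token, rejoining them with the separator; B never splits: it hops across the original string from one token start to the next via find on the separator and, once the current suffix starts with a C1/C2/C3 token, returns that suffix cut at the first occurrence of separator-followed-by-rep.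
import Mathlib
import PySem

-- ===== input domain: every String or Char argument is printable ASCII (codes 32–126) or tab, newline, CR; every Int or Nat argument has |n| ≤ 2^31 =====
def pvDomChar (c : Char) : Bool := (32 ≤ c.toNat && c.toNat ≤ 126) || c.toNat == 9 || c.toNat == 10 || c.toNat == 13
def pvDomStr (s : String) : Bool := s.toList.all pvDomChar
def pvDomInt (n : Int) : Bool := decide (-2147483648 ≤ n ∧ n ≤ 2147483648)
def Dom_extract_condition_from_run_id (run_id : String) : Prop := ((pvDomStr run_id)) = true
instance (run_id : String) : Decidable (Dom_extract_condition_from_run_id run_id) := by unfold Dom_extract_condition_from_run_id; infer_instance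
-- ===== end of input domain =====

-- B replaces A's split/enumerate/index-loop token scan by a direct substring scan on the
-- string itself (hop between token starts with find("_"), cut at the first "_rep"); objective: simpler.


-- ===== PORT A =====
-- inner loop: `for j in range(i+1, len(parts)): if parts[j].startswith("rep"): break; condition_parts.append(parts[j])`
def pvInnerA (parts : List (List Char)) (acc : List (List Char)) : List Int → List (List Char)
  | [] => acc
  | j :: js =>
    match PySem.List.pyGet? parts j with
    | none => acc   -- unreachable: j ∈ range(i+1, len(parts))
    | some p =>
      if PySem.Chars.startswith p ['r','e','p'] then acc
      else pvInnerA parts (acc ++ [p]) js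

-- outer loop: `for i, part in enumerate(parts): if part.startswith("C1") or …: return "_".join(…)`
def pvOuterA (parts : List (List Char)) : List (Int × List Char) → String
  | [] => "unknown"
  | (i, part) :: rest =>
    if PySem.Chars.startswith part ['C','1'] || PySem.Chars.startswith part ['C','2'] ||
       PySem.Chars.startswith part ['C','3'] then
      String.ofList (PySem.Chars.join ['_']
        (pvInnerA parts [part] (PySem.List.pyRange (i + 1) parts.length 1)))
    else pvOuterA parts rest

def extract_condition_from_run_id (run_id : String) : String :=
  let parts := PySem.Chars.splitOn run_id.toList ['_']
  pvOuterA parts (PySem.List.enumerate parts 0)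

-- ===== PORT B =====
-- while-loop of Source B: recursion on the current suffix `s`
def pvScanB (cs : List Char) : String :=
  if (PySem.Chars.slice cs none (some 1) == ['C']) &&
     ([['1'],['2'],['3']].contains (PySem.Chars.slice cs (some 1) (some 2))) then
    -- `stop = s.find("_rep"); return s if stop == -1 else s[:stop]`
    let stop := PySem.Chars.find cs ['_','r','e','p']
    if stop = -1 then String.ofList cs
    else String.ofList (PySem.Chars.slice cs none (some stop))
  else
    -- `cut = s.find("_"); if cut == -1: return "unknown"; s = s[cut+1:]`
    let cut := PySem.Chars.find cs ['_']
    if h : cut = -1 then "unknown"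
    else pvScanB (PySem.Chars.slice cs (some (cut + 1)) none)
termination_by cs.length
decreasing_by
  have h1 : (0:Int) ≤ PySem.Chars.find cs ['_'] := by
    have := PySem.Chars.neg_one_le_find cs ['_']; omega
  have h2 : cs ≠ [] := by
    intro hnil
    have : ['_'] <:+: cs := (PySem.Chars.find_nonneg_iff cs ['_']).mp h1
    rw [hnil] at this
    simpa using List.sublist_nil.mp this.sublist
  have h3 : PySem.Chars.slice cs (some (PySem.Chars.find cs ['_'] + 1)) none
      = List.drop (PySem.Chars.find cs ['_'] + 1).toNat cs := by
    rw [PySem.Chars.slice_eq_listSlice, PySem.List.slice_from cs (by omega)]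
  rw [h3]
  have h4 : 1 ≤ (PySem.Chars.find cs ['_'] + 1).toNat := by omega
  have h5 : 0 < cs.length := List.length_pos_iff.mpr h2
  simp only [List.length_drop]
  omega

def extract_condition_from_run_id_alt (run_id : String) : String :=
  pvScanB run_id.toList

-- ===== PRECONDITION & SPEC =====
def Spec_extract_condition_from_run_id (run_id : String) (out : String) : Prop := out = extract_condition_from_run_id_alt run_id
instance (run_id : String) (out : String) : Decidable (Spec_extract_condition_from_run_id run_id out) := by unfold Spec_extract_condition_from_run_id; infer_instance

-- ===== CLAIM (what is proved, stated in full; the proofs are below) =====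
def Claim_equal_extract_condition_from_run_id : Prop := ∀ (run_id : String), Dom_extract_condition_from_run_id run_id → Spec_extract_condition_from_run_id run_id (extract_condition_from_run_id run_id)

-- ===== LEMMAS AND PROOFS =====

-- shared token-level reference semantics
def pvNonRep (r : List Char) : Bool := !PySem.Chars.startswith r ['r','e','p']
def pvCondC (t : List Char) : Bool :=
  PySem.Chars.startswith t ['C','1'] || PySem.Chars.startswith t ['C','2'] ||
  PySem.Chars.startswith t ['C','3']

def pvTokRes : List (List Char) → String
  | [] => "unknown"
  | t :: rest =>
    if pvCondC t then
      String.ofList (PySem.Chars.join ['_'] (t :: rest.takeWhile pvNonRep))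
    else pvTokRes rest

-- ---- splitOn bridge: PySem's split equals Mathlib's List.splitOn ----
lemma pv_go_eq (fuel : Nat) : ∀ (l cur : List Char) (acc : List (List Char)),
    l.length < fuel →
    PySem.Chars.splitOn.go ['_'] fuel l cur acc
      = acc.reverse ++ List.modifyHead (cur.reverse ++ ·) (List.splitOnP (· == '_') l) := by
  induction fuel with
  | zero => intro l cur acc h; omega
  | succ fuel ih =>
    intro l cur acc h
    cases l with
    | nil =>
      simp [PySem.Chars.splitOn.go, List.splitOnP_nil]
    | cons c rest =>
      have hstep : PySem.Chars.splitOn.go ['_'] (fuel+1) (c :: rest) cur acc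
          = if ['_'].isPrefixOf (c :: rest) then
              PySem.Chars.splitOn.go ['_'] fuel (List.drop 1 (c::rest)) [] (cur.reverse :: acc)
            else PySem.Chars.splitOn.go ['_'] fuel rest (c :: cur) acc := by
        simp [PySem.Chars.splitOn.go]
      rw [hstep, List.splitOnP_cons]
      by_cases hc : c = '_'
      · simp only [hc, List.isPrefixOf, List.cons_beq_cons, BEq.rfl, Bool.true_and,
          List.isPrefixOf_nil_left, if_pos, List.drop_one, List.tail_cons, beq_self_eq_true, if_true]
        rw [ih rest [] (cur.reverse :: acc) (by simp only [List.length_cons] at h; omega)]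
        rcases hsp : List.splitOnP (fun c => c == '_') rest with _ | ⟨hd, tl⟩
        · exact absurd hsp (List.splitOnP_ne_nil _ _)
        · simp
      · have hpre : ['_'].isPrefixOf (c :: rest) = false := by
          simp [List.isPrefixOf, hc]
          intro h'; exact absurd h'.symm hc
        rw [hpre]
        simp only [Bool.false_eq_true, if_false]
        rw [ih rest (c :: cur) acc (by simp only [List.length_cons] at h; omega)]
        have : (c == '_') = false := by simp [hc]
        rw [this]
        simp only [Bool.false_eq_true, if_false]
        rcases hsp : List.splitOnP (fun c => c == '_') rest with _ | ⟨hd, tl⟩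
        · exact absurd hsp (List.splitOnP_ne_nil _ _)
        · simp

lemma pv_splitOn_eq (cs : List Char) :
    PySem.Chars.splitOn cs ['_'] = List.splitOn '_' cs := by
  rw [PySem.Chars.splitOn.eq_def, pv_go_eq (cs.length + 1) cs [] [] (by omega)]
  rcases hsp : List.splitOnP (fun c => c == '_') cs with _ | ⟨hd, tl⟩
  · exact absurd hsp (List.splitOnP_ne_nil _ _)
  · simp [List.splitOn, hsp]

lemma pv_splitOnP_sep_free (l : List Char) :
    ∀ t ∈ List.splitOnP (fun c => c == '_') l, '_' ∉ t := by
  induction l with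
  | nil => simp [List.splitOnP_nil]
  | cons c rest ih =>
    rw [List.splitOnP_cons]
    by_cases hc : c = '_'
    · simp only [hc, beq_self_eq_true, if_true]
      intro t ht
      rcases List.mem_cons.mp ht with h | h
      · simp [h]
      · exact ih t h
    · have : (c == '_') = false := by simp [hc]
      rw [this]
      simp only [Bool.false_eq_true, if_false]
      rcases hsp : List.splitOnP (fun c => c == '_') rest with _ | ⟨hd, tl⟩
      · exact absurd hsp (List.splitOnP_ne_nil _ _)
      · rw [List.modifyHead_cons]
        intro t ht
        rcases List.mem_cons.mp ht with h | h
        · subst h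
          intro hmem
          rcases List.mem_cons.mp hmem with h | h
          · exact hc h.symm
          · exact ih hd (hsp ▸ List.mem_cons_self) h
        · exact ih t (hsp ▸ List.mem_cons_of_mem _ h)

-- ---- join lemmas ----
lemma pv_join_eq_intercalate (sep : List Char) (ls : List (List Char)) :
    PySem.Chars.join sep ls = sep.intercalate ls := by
  induction ls with
  | nil => simp [PySem.Chars.join_nil, List.intercalate]
  | cons p ps ih =>
    cases ps with
    | nil => simp [PySem.Chars.join_singleton, List.intercalate]
    | cons q rest =>
      rw [PySem.Chars.join_cons_cons, ih]
      simp [List.intercalate, List.intersperse]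

lemma pv_join_append (sep : List Char) (as : List (List Char)) (b : List Char)
    (bs : List (List Char)) (h : as ≠ []) :
    PySem.Chars.join sep (as ++ b :: bs)
      = PySem.Chars.join sep as ++ sep ++ PySem.Chars.join sep (b :: bs) := by
  induction as with
  | nil => exact absurd rfl h
  | cons a as' ih =>
    cases as' with
    | nil => simp [PySem.Chars.join_singleton, PySem.Chars.join_cons_cons]
    | cons a2 as'' =>
      rw [List.cons_append, List.cons_append, PySem.Chars.join_cons_cons,
        PySem.Chars.join_cons_cons, ← List.cons_append,
        ih (by simp)]
      simp [List.append_assoc]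

-- ---- A-side: the index loops compute pvTokRes ----
lemma pv_innerA_eq (parts : List (List Char)) (k : Nat) : ∀ acc,
    pvInnerA parts acc (PySem.List.pyRange (k : Int) parts.length 1)
      = acc ++ (parts.drop k).takeWhile pvNonRep := by
  suffices H : ∀ (n k : Nat) (acc : List (List Char)), parts.length - k ≤ n →
      pvInnerA parts acc (PySem.List.pyRange (k : Int) parts.length 1)
        = acc ++ (parts.drop k).takeWhile pvNonRep by
    intro acc; exact H (parts.length - k) k acc le_rfl
  intro n
  induction n with
  | zero =>
    intro k acc h
    have hk : parts.length ≤ k := by omega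
    rw [PySem.List.pyRange_one_eq_nil (by exact_mod_cast hk), List.drop_eq_nil_of_le hk]
    simp [pvInnerA]
  | succ n ih =>
    intro k acc h
    by_cases hk : k < parts.length
    · rw [PySem.List.pyRange_one_cons (by exact_mod_cast hk)]
      simp only [pvInnerA, PySem.List.pyGet?_natCast, List.getElem?_eq_getElem hk]
      rw [List.drop_eq_getElem_cons hk, List.takeWhile_cons]
      by_cases hs : PySem.Chars.startswith parts[k] ['r','e','p']
      · simp [hs, pvNonRep]
      · have hcast : ((k : Int) + 1) = ((k + 1 : Nat) : Int) := by push_cast; ring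
        simp only [hs, Bool.false_eq_true, if_false]
        rw [hcast, ih (k + 1) (acc ++ [parts[k]]) (by omega)]
        simp [pvNonRep, hs]
    · have hk' : parts.length ≤ k := by omega
      rw [PySem.List.pyRange_one_eq_nil (by exact_mod_cast hk'), List.drop_eq_nil_of_le hk']
      simp [pvInnerA]

lemma pv_outerA_eq : ∀ (ts pre parts : List (List Char)), parts = pre ++ ts →
    pvOuterA parts (PySem.List.enumerate ts (pre.length : Int)) = pvTokRes ts := by
  intro ts
  induction ts with
  | nil => intro pre parts _; rw [PySem.List.enumerate_nil]; rfl
  | cons t rest ih =>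
    intro pre parts hp
    rw [PySem.List.enumerate_cons]
    show (if pvCondC t then _ else pvOuterA parts (PySem.List.enumerate rest ((pre.length : Int) + 1))) = pvTokRes (t :: rest)
    unfold pvTokRes
    by_cases hc : pvCondC t
    · rw [if_pos hc, if_pos hc]
      have hcast : ((pre.length : Int) + 1) = ((pre.length + 1 : Nat) : Int) := by push_cast; ring
      rw [hcast, pv_innerA_eq parts (pre.length + 1) [t]]
      have hdrop : parts.drop (pre.length + 1) = rest := by
        rw [hp, show pre ++ t :: rest = (pre ++ [t]) ++ rest by simp,
          show pre.length + 1 = (pre ++ [t]).length by simp]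
        exact List.drop_left
      rw [hdrop]
      rfl
    · rw [if_neg hc, if_neg hc]
      have hcast : ((pre.length : Int) + 1) = (((pre ++ [t]).length : Nat) : Int) := by
        simp
      rw [hcast, ih (pre ++ [t]) parts (by rw [hp]; simp)]

-- ---- B-side: find lemmas ----
lemma pv_find_sep_cons_none (t w : List Char) (ht : '_' ∉ t) :
    PySem.Chars.find t ('_' :: w) = -1 := by
  rw [PySem.Chars.find_eq_neg_one_iff]
  intro h
  exact ht (h.subset List.mem_cons_self)

lemma pv_no_occ_inside (t z w : List Char) (ht : '_' ∉ t) :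
    ∀ i < t.length, ¬ ('_' :: w) <+: (t ++ z).drop i := by
  intro i hi hp
  rw [List.drop_append_of_le_length (le_of_lt hi), List.drop_eq_getElem_cons hi,
    List.cons_append] at hp
  have := (List.cons_prefix_cons.mp hp).1
  exact ht (this ▸ List.getElem_mem hi)

lemma pv_find_eq_of (cs sub : List Char) (k : Nat)
    (hpre : sub <+: cs.drop k) (hmin : ∀ i < k, ¬ sub <+: cs.drop i) :
    PySem.Chars.find cs sub = (k : Int) := by
  have hinf : sub <:+: cs := hpre.isInfix.trans (List.drop_suffix k cs).isInfix
  have h0 : 0 ≤ PySem.Chars.find cs sub := (PySem.Chars.find_nonneg_iff cs sub).mpr hinf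
  obtain ⟨h1, h2⟩ := PySem.Chars.find_spec h0
  have hk1 : ¬ ((PySem.Chars.find cs sub).toNat < k) := fun h => hmin _ h h1
  have hk2 : ¬ (k < (PySem.Chars.find cs sub).toNat) := fun h => h2 k h hpre
  omega

lemma pv_rep_prefix_append (u v : List Char) (hu : '_' ∉ u) :
    (['r','e','p'] <+: u ++ '_' :: v) ↔ ['r','e','p'] <+: u := by
  rcases u with _ | ⟨a, _ | ⟨b, _ | ⟨c, u'⟩⟩⟩ <;>
    simp_all [List.cons_prefix_cons]

lemma pv_find_append_sep (t z w : List Char) (ht : '_' ∉ t) :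
    PySem.Chars.find (t ++ '_' :: z) ('_' :: w)
      = if w <+: z then (t.length : Int)
        else if PySem.Chars.find z ('_' :: w) = -1 then -1
        else (t.length : Int) + 1 + PySem.Chars.find z ('_' :: w) := by
  by_cases hw : w <+: z
  · rw [if_pos hw]
    apply pv_find_eq_of _ _ t.length
    · rw [show (t ++ '_' :: z).drop t.length = '_' :: z from List.drop_left]
      exact List.cons_prefix_cons.mpr ⟨rfl, hw⟩
    · exact pv_no_occ_inside t ('_' :: z) w ht
  · rw [if_neg hw]
    by_cases hz : PySem.Chars.find z ('_' :: w) = -1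
    · rw [if_pos hz, PySem.Chars.find_eq_neg_one_iff]
      intro hin
      have hex : ∃ j, ('_' :: w) <+: (t ++ '_' :: z).drop j :=
        (PySem.Chars.exists_prefix_drop_iff_isIn _ _).mpr ((PySem.Chars.isIn_iff_infix _ _).mpr hin)
      obtain ⟨j, hj⟩ := hex
      rcases lt_trichotomy j t.length with h | h | h
      · exact pv_no_occ_inside t _ w ht j h hj
      · rw [h, List.drop_left] at hj
        exact hw (List.cons_prefix_cons.mp hj).2
      · have hdj : (t ++ '_' :: z).drop j = z.drop (j - t.length - 1) := by
          rw [List.drop_append, List.drop_eq_nil_of_le (by omega)]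
          have : j - t.length = (j - t.length - 1) + 1 := by omega
          rw [this]
          simp
        rw [hdj] at hj
        exact (PySem.Chars.find_eq_neg_one_iff z _).mp hz
          (hj.isInfix.trans (List.drop_suffix _ _).isInfix)
    · rw [if_neg hz]
      have h0 : 0 ≤ PySem.Chars.find z ('_' :: w) := by
        have := PySem.Chars.neg_one_le_find z ('_' :: w); omega
      obtain ⟨h1, h2⟩ := PySem.Chars.find_spec h0
      have key : PySem.Chars.find (t ++ '_' :: z) ('_' :: w)
          = ((t.length + 1 + (PySem.Chars.find z ('_' :: w)).toNat : Nat) : Int) := by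
        apply pv_find_eq_of
        · rw [List.drop_append, List.drop_eq_nil_of_le (by omega)]
          have : t.length + 1 + (PySem.Chars.find z ('_' :: w)).toNat - t.length
              = (PySem.Chars.find z ('_' :: w)).toNat + 1 := by omega
          rw [this]
          simpa using h1
        · intro i hi
          rcases lt_trichotomy i t.length with h | h | h
          · exact pv_no_occ_inside t _ w ht i h
          · rw [h, List.drop_left]
            intro hp
            exact hw (List.cons_prefix_cons.mp hp).2
          · have hdj : (t ++ '_' :: z).drop i = z.drop (i - t.length - 1) := by
              rw [List.drop_append, List.drop_eq_nil_of_le (by omega)]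
              have : i - t.length = (i - t.length - 1) + 1 := by omega
              rw [this]
              simp
            rw [hdj]
            exact h2 _ (by omega)
      rw [key]
      have := Int.toNat_of_nonneg h0
      push_cast
      omega

lemma pv_findRep_tok : ∀ (rest : List (List Char)) (t : List Char), '_' ∉ t →
    (∀ u ∈ rest, '_' ∉ u) →
    PySem.Chars.find (PySem.Chars.join ['_'] (t :: rest)) ['_','r','e','p']
      = if rest.all pvNonRep then -1
        else ((PySem.Chars.join ['_'] (t :: rest.takeWhile pvNonRep)).length : Int) := by
  intro rest
  induction rest with
  | nil =>
    intro t ht _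
    rw [PySem.Chars.join_singleton]
    simp only [List.all_nil, if_true]
    exact pv_find_sep_cons_none t ['r','e','p'] ht
  | cons u rest' ih =>
    intro t ht hu
    have hcs : PySem.Chars.join ['_'] (t :: u :: rest')
        = t ++ '_' :: PySem.Chars.join ['_'] (u :: rest') := by
      rw [PySem.Chars.join_cons_cons]; simp
    rw [hcs]
    rw [show (['_','r','e','p'] : List Char) = '_' :: ['r','e','p'] from rfl,
      pv_find_append_sep _ _ _ ht]
    have hrepz : (['r','e','p'] <+: PySem.Chars.join ['_'] (u :: rest')) ↔ ['r','e','p'] <+: u := by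
      cases rest' with
      | nil => rw [PySem.Chars.join_singleton]
      | cons v rest'' =>
        rw [PySem.Chars.join_cons_cons,
          show u ++ ['_'] ++ PySem.Chars.join ['_'] (v :: rest'')
            = u ++ '_' :: PySem.Chars.join ['_'] (v :: rest'') by simp]
        exact pv_rep_prefix_append u _ (hu u List.mem_cons_self)
    by_cases hru : ['r','e','p'] <+: u
    · rw [if_pos (hrepz.mpr hru)]
      have hnr : pvNonRep u = false := by
        simp [pvNonRep, PySem.Chars.startswith_iff, hru]
      rw [List.all_cons, hnr, List.takeWhile_cons, hnr]
      simp [PySem.Chars.join_singleton]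
    · rw [if_neg (fun h => hru (hrepz.mp h))]
      rw [ih u (hu u List.mem_cons_self) (fun v hv => hu v (List.mem_cons_of_mem _ hv))]
      have hsw : PySem.Chars.startswith u ['r','e','p'] = false := by
        rw [Bool.eq_false_iff]
        intro h
        exact hru ((PySem.Chars.startswith_iff _ _).mp h)
      have hnr : pvNonRep u = true := by simp [pvNonRep, hsw]
      rw [List.all_cons, hnr, Bool.true_and, List.takeWhile_cons, hnr]
      by_cases hall : rest'.all pvNonRep
      · rw [if_pos hall, if_pos hall]
        simp
      · rw [if_neg hall, if_neg hall]
        have hne : ((PySem.Chars.join ['_'] (u :: rest'.takeWhile pvNonRep)).length : Int) ≠ -1 := by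
          omega
        rw [if_neg hne]
        simp only [if_true]
        rw [show (t :: u :: rest'.takeWhile pvNonRep)
            = t :: u :: rest'.takeWhile pvNonRep from rfl,
          PySem.Chars.join_cons_cons]
        simp only [List.length_append, List.length_cons, List.length_nil]
        push_cast
        ring

-- ---- B-side: the guard of pvScanB seen at a token start ----
lemma pv_guard_eq (t tail : List Char) (ht : '_' ∉ t)
    (htail : tail = [] ∨ ∃ w, tail = '_' :: w) :
    ((PySem.Chars.slice (t ++ tail) none (some 1) == ['C']) &&
     ([['1'],['2'],['3']].contains (PySem.Chars.slice (t ++ tail) (some 1) (some 2))))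
      = pvCondC t := by
  have hsl1 : PySem.Chars.slice (t ++ tail) none (some 1) = (t ++ tail).take 1 := by
    rw [PySem.Chars.slice_eq_listSlice, PySem.List.slice_to _ (by norm_num)]
    rfl
  have hsl2 : PySem.Chars.slice (t ++ tail) (some 1) (some 2) = ((t ++ tail).drop 1).take 1 := by
    rw [PySem.Chars.slice_eq_listSlice, PySem.List.slice_toNat _ (by norm_num) (by norm_num)]
    rfl
  rw [hsl1, hsl2, Bool.eq_iff_iff]
  rcases htail with h | ⟨w, h⟩ <;> subst h <;>
    rcases t with _ | ⟨a, _ | ⟨b, t'⟩⟩ <;>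
      simp_all [pvCondC, PySem.Chars.startswith_iff, List.cons_prefix_cons] <;>
        tauto

lemma pv_scanB_eq : ∀ (rest : List (List Char)) (t : List Char), '_' ∉ t →
    (∀ u ∈ rest, '_' ∉ u) →
    pvScanB (PySem.Chars.join ['_'] (t :: rest)) = pvTokRes (t :: rest) := by
  intro rest
  induction rest with
  | nil =>
    intro t ht _
    rw [PySem.Chars.join_singleton, pvScanB]
    have hg := pv_guard_eq t [] ht (Or.inl rfl)
    rw [List.append_nil] at hg
    rw [hg]
    unfold pvTokRes
    by_cases hc : pvCondC t
    · rw [if_pos hc, if_pos hc]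
      rw [show (['_','r','e','p'] : List Char) = '_' :: ['r','e','p'] from rfl,
        pv_find_sep_cons_none t ['r','e','p'] ht]
      simp [PySem.Chars.join_singleton]
    · rw [if_neg hc, if_neg hc]
      rw [show (['_'] : List Char) = '_' :: [] from rfl, pv_find_sep_cons_none t [] ht]
      rfl
  | cons u rest' ih =>
    intro t ht hu
    have hz : PySem.Chars.join ['_'] (t :: u :: rest')
        = t ++ '_' :: PySem.Chars.join ['_'] (u :: rest') := by
      rw [PySem.Chars.join_cons_cons]; simp
    rw [hz, pvScanB]
    rw [pv_guard_eq t ('_' :: PySem.Chars.join ['_'] (u :: rest')) ht (Or.inr ⟨_, rfl⟩)]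
    unfold pvTokRes
    by_cases hc : pvCondC t
    · rw [if_pos hc, if_pos hc]
      have hfind := pv_findRep_tok (u :: rest') t ht hu
      rw [hz] at hfind
      rw [hfind]
      by_cases hall : (u :: rest').all pvNonRep
      · rw [if_pos hall]
        simp only [if_pos rfl]
        rw [List.takeWhile_eq_self_iff.mpr (fun x hx => by
          have := List.all_eq_true.mp hall x hx; exact this), ← hz]
        simp
      · rw [if_neg hall]
        have hne : ((PySem.Chars.join ['_']
            (t :: (u :: rest').takeWhile pvNonRep)).length : Int) ≠ -1 := by omega
        rw [if_neg hne]
        rw [PySem.Chars.slice_eq_listSlice, PySem.List.slice_to _ (by positivity)]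
        have hdw : (u :: rest').dropWhile pvNonRep ≠ [] := by
          intro h0
          exact hall (List.all_eq_true.mpr (List.dropWhile_eq_nil_iff.mp h0))
        obtain ⟨r, rest2, hr⟩ := List.exists_cons_of_ne_nil hdw
        have hlist : t :: u :: rest' = (t :: (u :: rest').takeWhile pvNonRep) ++ r :: rest2 := by
          rw [List.cons_append]
          congr 1
          rw [← hr, List.takeWhile_append_dropWhile]
        have hjj : t ++ '_' :: PySem.Chars.join ['_'] (u :: rest')
            = PySem.Chars.join ['_'] (t :: (u :: rest').takeWhile pvNonRep)
              ++ '_' :: PySem.Chars.join ['_'] (r :: rest2) := by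
          rw [← hz, hlist, pv_join_append _ _ _ _ (by simp)]
          simp
        rw [hjj, Int.toNat_natCast,
          show (PySem.Chars.join ['_'] (t :: (u :: rest').takeWhile pvNonRep)) ++ '_'
              :: PySem.Chars.join ['_'] (r :: rest2)
            = (PySem.Chars.join ['_'] (t :: (u :: rest').takeWhile pvNonRep))
              ++ ('_' :: PySem.Chars.join ['_'] (r :: rest2)) from rfl,
          List.take_left]
    · rw [if_neg hc, if_neg hc]
      have hcut := pv_find_append_sep t (PySem.Chars.join ['_'] (u :: rest')) [] ht
      rw [if_pos List.nil_prefix] at hcut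
      rw [show (['_'] : List Char) = '_' :: [] from rfl, hcut]
      rw [dif_neg (by omega : (t.length : Int) ≠ -1)]
      rw [PySem.Chars.slice_eq_listSlice, PySem.List.slice_from _ (by positivity)]
      have hdrop : ((t.length : Int) + 1).toNat = t.length + 1 := by omega
      rw [hdrop,
        show t ++ '_' :: PySem.Chars.join ['_'] (u :: rest')
          = (t ++ ['_']) ++ PySem.Chars.join ['_'] (u :: rest') by simp,
        show t.length + 1 = (t ++ ['_']).length by simp,
        List.drop_left]
      exact ih u (hu u List.mem_cons_self) (fun v hv => hu v (List.mem_cons_of_mem _ hv))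

-- ===== VERDICT (by name: the statement is the Claim_ definition above) =====
theorem extract_condition_from_run_id_spec : Claim_equal_extract_condition_from_run_id := by
  intro run_id _
  unfold Spec_extract_condition_from_run_id extract_condition_from_run_id
    extract_condition_from_run_id_alt
  have hsp : PySem.Chars.splitOn run_id.toList ['_'] = List.splitOn '_' run_id.toList :=
    pv_splitOn_eq run_id.toList
  have hfree : ∀ t ∈ PySem.Chars.splitOn run_id.toList ['_'], '_' ∉ t := by
    rw [hsp]; exact pv_splitOnP_sep_free run_id.toList
  have hne : PySem.Chars.splitOn run_id.toList ['_'] ≠ [] := by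
    rw [hsp]; exact List.splitOnP_ne_nil _ _
  have hjoin : PySem.Chars.join ['_'] (PySem.Chars.splitOn run_id.toList ['_']) = run_id.toList := by
    rw [pv_join_eq_intercalate, hsp]
    exact List.intercalate_splitOn run_id.toList '_'
  obtain ⟨t, rest, hts⟩ := List.exists_cons_of_ne_nil hne
  have hA : pvOuterA (PySem.Chars.splitOn run_id.toList ['_'])
      (PySem.List.enumerate (PySem.Chars.splitOn run_id.toList ['_']) 0)
        = pvTokRes (PySem.Chars.splitOn run_id.toList ['_']) := by
    have := pv_outerA_eq (PySem.Chars.splitOn run_id.toList ['_']) []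
      (PySem.Chars.splitOn run_id.toList ['_']) rfl
    simpa using this
  have h1 : run_id.toList = PySem.Chars.join ['_'] (t :: rest) := by
    rw [← hts, hjoin]
  have hB : pvScanB run_id.toList = pvTokRes (t :: rest) := by
    rw [h1]
    exact pv_scanB_eq rest t (hfree t (by rw [hts]; exact List.mem_cons_self))
      (fun u hu' => hfree u (by rw [hts]; exact List.mem_cons_of_mem _ hu'))
  rw [hA, hB, hts]
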